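-- pv_equiv track=rewrite | github.com/GeorgRashkov/Pixel_Colour_Manipulator | app/Number_format_checker.py | check_for_positive_int_format
-- ===== SOURCE A (Python) =====
-- def check_for_positive_int_format(txt_value:str, is_zero_allowed:bool=True):
--     if(txt_value == ''):
--         return True
--
--     allowed_chars = ['0','1','2','3','4','5','6','7','8','9']
--
--     for symbol in txt_value:
--
--         if(symbol not in allowed_chars):
--             return False
--
--     if(is_zero_allowed==False and txt_value=='0'):
--         return False
--
--     return check_for_leading_zeros(txt_value)
--
-- def check_for_leading_zeros(txt_value:str):
--
--     if(len(txt_value) < 2):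
--         return True
--
--     digits = ['0','1','2','3','4','5','6','7','8','9']
--
--     if(
--         (txt_value[0] == "0" and txt_value[1] != ".")
--         or (len(txt_value) > 2 and txt_value[0] == "-" and txt_value[1] == "0" and txt_value[2] != ".")
--         ):
--         return False
--
--     return True
-- ===== SOURCE B (Python) =====
-- def check_for_positive_int_format(txt_value: str, is_zero_allowed: bool = True):
--     if txt_value == '':
--         return True
--     # Horner fold: compute the numeric value; a non-digit aborts.
--     value = 0
--     for symbol in txt_value:
--         d = ord(symbol) - 48
--         if d < 0 or d > 9:
--             return False
--         value = value * 10 + d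
--     n = len(txt_value)
--     # arithmetic leading-zero test: an n-digit string has no leading zero iff its value >= 10^(n-1)
--     if n != 1 and value < 10 ** (n - 1):
--         return False
--     if not is_zero_allowed and n == 1 and value == 0:
--         return False
--     return True
-- ===== Notes on version B (the rewrite author's own statement) =====
-- stated objective: alternative
-- what changed: Replaces A's syntactic two-function design (membership scan against a ten-element digit list plus a separate leading-zeros helper inspecting the first characters) by a numeric one: a single Horner fold computes the string's integer value and the no-leading-zeros condition becomes the arithmetic test value >= 10**(n-1).
import Mathlib
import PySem

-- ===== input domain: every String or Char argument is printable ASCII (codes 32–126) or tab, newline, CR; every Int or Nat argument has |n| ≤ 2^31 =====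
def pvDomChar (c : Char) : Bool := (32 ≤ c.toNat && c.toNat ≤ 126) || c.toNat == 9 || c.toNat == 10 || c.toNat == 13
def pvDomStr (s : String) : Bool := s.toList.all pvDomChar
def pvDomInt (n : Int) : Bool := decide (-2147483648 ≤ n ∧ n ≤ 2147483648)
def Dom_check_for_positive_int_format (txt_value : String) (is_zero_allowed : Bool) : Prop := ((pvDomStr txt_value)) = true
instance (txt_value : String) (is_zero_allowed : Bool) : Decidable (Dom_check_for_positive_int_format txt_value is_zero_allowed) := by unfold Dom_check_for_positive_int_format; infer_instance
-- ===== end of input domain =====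

-- ===== PORT A =====
-- B replaces A's syntactic design (membership scan against a digit list + a separate
-- leading-zeros helper looking at the first characters) by a numeric one: a single Horner
-- fold computes the string's value and the no-leading-zeros condition becomes the arithmetic test
-- value ≥ 10^(n-1); objective: alternative (value-based instead of syntactic), same cost.
-- Helper: literal port of check_for_leading_zeros (on the code-point list of the string).
def check_for_leading_zeros (txt_value : String) : Bool :=
  let l := txt_value.toList
  if l.length < 2 then true
  else if (PySem.List.pyGet? l 0 == some '0' && !(PySem.List.pyGet? l 1 == some '.'))
          || (decide (l.length > 2) && PySem.List.pyGet? l 0 == some '-'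
              && PySem.List.pyGet? l 1 == some '0' && !(PySem.List.pyGet? l 2 == some '.')) then
    false
  else true

def check_for_positive_int_format (txt_value : String) (is_zero_allowed : Bool) : Bool :=
  if txt_value.toList = [] then true
  else
    let allowed_chars : List Char := ['0','1','2','3','4','5','6','7','8','9']
    -- the for-loop returning False at the first symbol not in allowed_chars:
    if !(txt_value.toList.all (fun symbol => allowed_chars.contains symbol)) then false
    else if is_zero_allowed == false && txt_value.toList = ['0'] then false
    else check_for_leading_zeros txt_value

-- ===== PORT B =====
-- the for-loop of Source B: Horner accumulation, aborting (none) at the first non-digit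
def pvHorner : List Char → Int → Option Int
  | [], value => some value
  | symbol :: rest, value =>
      if decide ((symbol.toNat : Int) - 48 < 0) || decide (9 < (symbol.toNat : Int) - 48) then none
      else pvHorner rest (value * 10 + ((symbol.toNat : Int) - 48))

def check_for_positive_int_format_alt (txt_value : String) (is_zero_allowed : Bool) : Bool :=
  if txt_value.toList = [] then true
  else
    match pvHorner txt_value.toList 0 with
    | none => false
    | some value =>
        let n := txt_value.toList.length
        if decide (n ≠ 1) && decide (value < 10 ^ (n - 1)) then false
        else if is_zero_allowed == false && decide (n = 1) && decide (value = 0) then false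
        else true

-- ===== PRECONDITION & SPEC =====
def Spec_check_for_positive_int_format (txt_value : String) (is_zero_allowed : Bool) (out : Bool) : Prop := out = check_for_positive_int_format_alt txt_value is_zero_allowed
instance (txt_value : String) (is_zero_allowed : Bool) (out : Bool) : Decidable (Spec_check_for_positive_int_format txt_value is_zero_allowed out) := by unfold Spec_check_for_positive_int_format; infer_instance

-- ===== CLAIM =====
def Claim_equal_check_for_positive_int_format : Prop := ∀ (txt_value : String) (is_zero_allowed : Bool), Dom_check_for_positive_int_format txt_value is_zero_allowed → Spec_check_for_positive_int_format txt_value is_zero_allowed (check_for_positive_int_format txt_value is_zero_allowed)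

-- ===== LEMMAS AND PROOFS =====

-- c is a decimal digit, as a Bool on its code point
def digB (c : Char) : Bool := decide (48 ≤ c.toNat ∧ c.toNat ≤ 57)

-- membership in A's allowed list is the code-point range 48..57
lemma mem_allowed (c : Char) :
    (['0','1','2','3','4','5','6','7','8','9'] : List Char).contains c = digB c := by
  have hn : ∀ d : Char, (c = d) ↔ (c.toNat = d.toNat) :=
    fun d => ⟨fun h => by rw [h], fun h => Char.ext (UInt32.toNat_inj.mp h)⟩
  rw [Bool.eq_iff_iff]
  simp only [List.contains_eq_mem, decide_eq_true_eq, List.mem_cons, List.not_mem_nil,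
    or_false, hn, digB]
  have hv : ('0' : Char).toNat = 48 ∧ ('1' : Char).toNat = 49 ∧
      ('2' : Char).toNat = 50 ∧ ('3' : Char).toNat = 51 ∧
      ('4' : Char).toNat = 52 ∧ ('5' : Char).toNat = 53 ∧
      ('6' : Char).toNat = 54 ∧ ('7' : Char).toNat = 55 ∧
      ('8' : Char).toNat = 56 ∧ ('9' : Char).toNat = 57 := by decide
  omega

-- the branch test of pvHorner, as digB
lemma horner_branch (c : Char) :
    (decide ((c.toNat : Int) - 48 < 0) || decide (9 < (c.toNat : Int) - 48)) = !digB c := by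
  rw [Bool.eq_iff_iff]
  simp only [Bool.or_eq_true, decide_eq_true_eq, Bool.not_eq_true', digB, decide_eq_false_iff_not]
  omega

-- most-significant-digit-first value of a digit list
def msVal : List Char → Int
  | [] => 0
  | c :: cs => ((c.toNat : Int) - 48) * 10 ^ cs.length + msVal cs

lemma pvHorner_none (l : List Char) (acc : Int) (h : l.all digB = false) :
    pvHorner l acc = none := by
  induction l generalizing acc with
  | nil => simp at h
  | cons c cs ih =>
    simp only [List.all_cons, Bool.and_eq_false_iff] at h
    unfold pvHorner
    rw [horner_branch]
    rcases h with h | h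
    · simp [h]
    · by_cases hc : digB c = true
      · simp [hc, ih _ h]
      · simp [Bool.not_eq_true] at hc; simp [hc]

lemma pvHorner_some (l : List Char) (acc : Int) (h : l.all digB = true) :
    pvHorner l acc = some (acc * 10 ^ l.length + msVal l) := by
  induction l generalizing acc with
  | nil => simp [pvHorner, msVal]
  | cons c cs ih =>
    simp only [List.all_cons, Bool.and_eq_true] at h
    unfold pvHorner
    rw [horner_branch, h.1]
    simp only [Bool.not_true, Bool.false_eq_true, if_false, ih _ h.2, msVal,
      List.length_cons]
    congr 1
    ring

lemma msVal_bounds (l : List Char) (h : l.all digB = true) :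
    0 ≤ msVal l ∧ msVal l < 10 ^ l.length := by
  induction l with
  | nil => simp [msVal]
  | cons c cs ih =>
    simp only [List.all_cons, Bool.and_eq_true] at h
    obtain ⟨h0, h1⟩ := ih h.2
    have hc : 48 ≤ c.toNat ∧ c.toNat ≤ 57 := by
      have := h.1; simp only [digB, decide_eq_true_eq] at this; exact this
    have hd0 : (0 : Int) ≤ (c.toNat : Int) - 48 := by omega
    have hd9 : ((c.toNat : Int) - 48) ≤ 9 := by omega
    have hp : (0 : Int) < 10 ^ cs.length := by positivity
    constructor
    · simp only [msVal]
      nlinarith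
    · simp only [msVal, List.length_cons, pow_succ]
      nlinarith

-- no leading zero, numerically: for a digit string c::cs, value < 10^|cs| iff c = '0'
lemma msVal_lt_iff (c : Char) (cs : List Char) (h : (c :: cs).all digB = true) :
    (msVal (c :: cs) < 10 ^ cs.length) ↔ c = '0' := by
  simp only [List.all_cons, Bool.and_eq_true] at h
  obtain ⟨h0, h1⟩ := msVal_bounds cs h.2
  have hc : 48 ≤ c.toNat ∧ c.toNat ≤ 57 := by
    have := h.1; simp only [digB, decide_eq_true_eq] at this; exact this
  have hp : (0 : Int) < 10 ^ cs.length := by positivity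
  have hiff : (c = '0') ↔ c.toNat = 48 := by
    constructor
    · rintro rfl; rfl
    · intro h; exact Char.ext (UInt32.toNat_inj.mp h)
  simp only [msVal, hiff]
  constructor
  · intro hlt
    by_contra hne
    have h1le : (1 : Int) ≤ (c.toNat : Int) - 48 := by omega
    nlinarith
  · intro h48
    have : ((c.toNat : Int) - 48) = 0 := by omega
    rw [this]; linarith

lemma digB_ne_dot (c : Char) (h : digB c = true) : c ≠ '.' := by
  rintro rfl; revert h; decide

lemma digB_ne_dash (c : Char) (h : digB c = true) : c ≠ '-' := by
  rintro rfl; revert h; decide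

lemma digB_zero_iff (c : Char) (h : digB c = true) :
    ((c.toNat : Int) - 48 = 0) ↔ c = '0' := by
  simp only [digB, decide_eq_true_eq] at h
  constructor
  · intro h0
    have : c.toNat = 48 := by omega
    exact Char.ext (UInt32.toNat_inj.mp this)
  · rintro rfl; rfl

-- ===== VERDICT =====
theorem check_for_positive_int_format_spec : Claim_equal_check_for_positive_int_format := by
  intro s z _
  unfold Spec_check_for_positive_int_format check_for_positive_int_format
    check_for_positive_int_format_alt check_for_leading_zeros
  cases hl : s.toList with
  | nil => simp
  | cons c cs =>
    simp only [mem_allowed]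
    by_cases h : (c :: cs).all digB = true
    · -- all digits
      rw [pvHorner_some _ _ h]
      simp only [h, Bool.not_true, Bool.false_eq_true, if_false, reduceCtorEq,
        zero_mul, zero_add]
      have hcd : digB c = true := by
        simp only [List.all_cons, Bool.and_eq_true] at h; exact h.1
      cases cs with
      | nil =>
        -- one character
        simp only [List.length_cons, List.length_nil, msVal, pow_zero, mul_one,
          List.length_nil, add_zero]
        have hzi := digB_zero_iff c hcd
        by_cases hc0 : c = '0'
        · subst hc0
          cases z <;> simp
        · have hne : ¬ ((c.toNat : Int) - 48 = 0) := fun h' => hc0 (hzi.mp h')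
          cases z <;> simp [hc0, hne]
      | cons c2 cs2 =>
        -- length ≥ 2
        have hlt := msVal_lt_iff c (c2 :: cs2) h
        have hc2d : digB c2 = true := by
          simp only [List.all_cons, Bool.and_eq_true] at h; exact h.2.1
        have hdot := digB_ne_dot c2 hc2d
        have hdash := digB_ne_dash c hcd
        by_cases hc0 : c = '0'
        · subst hc0
          have hv : msVal ('0' :: c2 :: cs2) < 10 ^ (c2 :: cs2).length := hlt.mpr rfl
          simp only [List.length_cons] at hv ⊢
          cases z <;> simp [hdot, hv]
        · have hv : ¬ (msVal (c :: c2 :: cs2) < 10 ^ (c2 :: cs2).length) :=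
            fun h' => hc0 (hlt.mp h')
          simp only [List.length_cons] at hv ⊢
          cases z <;> simp [hc0, hdash, hv]
    · -- some non-digit
      rw [pvHorner_none _ _ (by simpa using h)]
      simp [h]
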